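-- pv_equiv track=rewrite | github.com/ravkambo/MarioParty | code.py | consistency_bonus
-- ===== SOURCE A (Python) =====
-- def consistency_bonus(placement_list):
--     """
--     Consistency rules (applied per player across all games):
--       - Back-to-back wins (1st place in two consecutive games): +2 points (once)
--       - Top 2 in 3 straight games: +3 points (once)
--       - No 4th places in any 5-game stretch: +2 points (once)
--     """
--     n = len(placement_list)
--     points = 0
--
--     # Back-to-back wins
--     back_to_back = any(
--         placement_list[i] == 1 and placement_list[i + 1] == 1
--         for i in range(n - 1)
--     )
--     if back_to_back:
--         points += 2
--
--     # Top 2 in 3 straight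
--     top2_3_straight = any(
--         all(placement_list[i + k] <= 2 for k in range(3))
--         for i in range(n - 2)
--     )
--     if top2_3_straight:
--         points += 3
--
--     # No 4th places in any 5-game window
--     if n >= 5:
--         no_fourth_5_games = any(
--             all(placement_list[i + k] != 4 for k in range(5))
--             for i in range(n - 4)
--         )
--         if no_fourth_5_games:
--             points += 2
--
--     return points
-- ===== SOURCE B (Python) =====
-- def consistency_bonus(placement_list):
--     """Single linear pass with run counters instead of window scans."""
--     prev_one = False
--     top2_run = 0
--     non4_run = 0
--     back_to_back = False
--     top2_flag = False
--     non4_flag = False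
--     for p in placement_list:
--         if p == 1 and prev_one:
--             back_to_back = True
--         prev_one = p == 1
--         top2_run = top2_run + 1 if p <= 2 else 0
--         if top2_run >= 3:
--             top2_flag = True
--         non4_run = non4_run + 1 if p != 4 else 0
--         if non4_run >= 5:
--             non4_flag = True
--     return (2 if back_to_back else 0) + (3 if top2_flag else 0) + (2 if non4_flag else 0)
-- ===== Notes on version B (the rewrite author's own statement) =====
-- stated objective: simpler
-- what changed: Replaced the three separate window scans (any/all comprehensions over index ranges) by one linear pass that maintains run counters (top-2 run, non-4th run) and a previous-was-1 flag, setting each bonus flag the moment its run reaches the required length.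
import Mathlib
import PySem

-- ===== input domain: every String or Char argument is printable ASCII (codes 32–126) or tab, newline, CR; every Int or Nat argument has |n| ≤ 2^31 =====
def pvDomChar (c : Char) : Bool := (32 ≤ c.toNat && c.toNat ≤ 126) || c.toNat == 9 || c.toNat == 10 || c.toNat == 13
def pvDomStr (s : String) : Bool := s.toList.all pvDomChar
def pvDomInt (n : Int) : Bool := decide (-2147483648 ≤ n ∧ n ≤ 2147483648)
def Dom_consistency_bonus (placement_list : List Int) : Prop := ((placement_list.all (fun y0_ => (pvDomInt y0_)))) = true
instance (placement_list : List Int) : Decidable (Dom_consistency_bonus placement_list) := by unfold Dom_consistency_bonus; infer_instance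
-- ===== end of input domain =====

-- B replaces A's three separate window scans by one linear pass with run counters (objective: simpler).


-- ===== PORT A =====
def consistency_bonus (placement_list : List Int) : Int :=
  let n : Int := PySem.List.len placement_list
  let points : Int := 0
  let back_to_back : Bool :=
    (PySem.List.pyRange 0 (n - 1) 1).any (fun i =>
      (PySem.List.pyGetD placement_list i 0 == 1) && (PySem.List.pyGetD placement_list (i + 1) 0 == 1))
  let points := if back_to_back then points + 2 else points
  let top2_3_straight : Bool :=
    (PySem.List.pyRange 0 (n - 2) 1).any (fun i =>
      (PySem.List.pyRange 0 3 1).all (fun k => decide (PySem.List.pyGetD placement_list (i + k) 0 ≤ 2)))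
  let points := if top2_3_straight then points + 3 else points
  if n ≥ 5 then
    let no_fourth_5_games : Bool :=
      (PySem.List.pyRange 0 (n - 4) 1).any (fun i =>
        (PySem.List.pyRange 0 5 1).all (fun k => PySem.List.pyGetD placement_list (i + k) 0 != 4))
    if no_fourth_5_games then points + 2 else points
  else points

-- ===== PORT B =====
-- state: (prev_one, top2_run, non4_run, back_to_back, top2_flag, non4_flag)
def pvStepB (s : Bool × Int × Int × Bool × Bool × Bool) (p : Int) : Bool × Int × Int × Bool × Bool × Bool :=
  match s with
  | (prevOne, t2run, n4run, btb, t2f, n4f) =>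
    let btb := btb || ((p == 1) && prevOne)
    let prevOne := p == 1
    let t2run := if p ≤ 2 then t2run + 1 else 0
    let t2f := t2f || decide (t2run ≥ 3)
    let n4run := if p ≠ 4 then n4run + 1 else 0
    let n4f := n4f || decide (n4run ≥ 5)
    (prevOne, t2run, n4run, btb, t2f, n4f)

def consistency_bonus_alt (placement_list : List Int) : Int :=
  let s := placement_list.foldl pvStepB (false, 0, 0, false, false, false)
  (if s.2.2.2.1 then 2 else 0) + (if s.2.2.2.2.1 then 3 else 0) + (if s.2.2.2.2.2 then 2 else 0)

-- ===== PRECONDITION & SPEC =====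
def Spec_consistency_bonus (placement_list : List Int) (out : Int) : Prop := out = consistency_bonus_alt placement_list
instance (placement_list : List Int) (out : Int) : Decidable (Spec_consistency_bonus placement_list out) := by unfold Spec_consistency_bonus; infer_instance

-- ===== CLAIM (what is proved, stated in full; the proofs are below) =====
def Claim_equal_consistency_bonus : Prop := ∀ (placement_list : List Int), Dom_consistency_bonus placement_list → Spec_consistency_bonus placement_list (consistency_bonus placement_list)

-- ===== LEMMAS AND PROOFS =====

/-- Length of the maximal suffix of `l` all of whose elements satisfy `P`. -/
def pvSuffRun (P : Int → Bool) (l : List Int) : Nat :=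
  l.foldl (fun r p => if P p then r + 1 else 0) 0

/-- `l` ends with a block of `k` elements all satisfying `P`. -/
def pvSuff (P : Int → Bool) (k : Nat) (l : List Int) : Prop :=
  ∃ a b, l = a ++ b ∧ b.length = k ∧ ∀ x ∈ b, P x = true

/-- `l` contains a contiguous block of `k` elements all satisfying `P`. -/
def pvWin (P : Int → Bool) (k : Nat) (l : List Int) : Prop :=
  ∃ a b c, l = a ++ b ++ c ∧ b.length = k ∧ ∀ x ∈ b, P x = true

def pvP1 : Int → Bool := fun p => p == 1
def pvP2 : Int → Bool := fun p => decide (p ≤ 2)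
def pvP4 : Int → Bool := fun p => p != 4

lemma pvSuffRun_append (P : Int → Bool) (l : List Int) (p : Int) :
    pvSuffRun P (l ++ [p]) = if P p then pvSuffRun P l + 1 else 0 := by
  simp [pvSuffRun, List.foldl_append]

lemma pvSuffRun_ge_iff (P : Int → Bool) (l : List Int) :
    ∀ k, k ≤ pvSuffRun P l ↔ pvSuff P k l := by
  induction l using List.reverseRecOn with
  | nil =>
    intro k
    constructor
    · intro h
      simp [pvSuffRun] at h
      exact ⟨[], [], by simp, by simp; omega, by simp⟩
    · rintro ⟨a, b, h, hb, -⟩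
      have := congrArg List.length h
      simp at this
      simp [pvSuffRun]
      omega
  | append_singleton l p ih =>
    intro k
    rw [pvSuffRun_append]
    cases hp : P p with
    | true =>
      simp only [if_pos]
      cases k with
      | zero =>
        simp only [Nat.zero_le, true_iff]
        exact ⟨l ++ [p], [], by simp, by simp, by simp⟩
      | succ k' =>
        rw [Nat.succ_le_succ_iff, ih k']
        constructor
        · rintro ⟨a, b, rfl, hb, hall⟩
          exact ⟨a, b ++ [p], by simp, by simp [hb], by
            intro x hx
            rcases List.mem_append.mp hx with h | h
            · exact hall x h
            · simp at h; subst h; exact hp⟩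
        · rintro ⟨a, b, h, hb, hall⟩
          rcases List.eq_nil_or_concat b with rfl | ⟨b', p0, rfl⟩
          · simp at hb
          · simp only [List.concat_eq_append, ← List.append_assoc] at h hb hall
            obtain ⟨h1, rfl⟩ := List.append_singleton_inj.mp h.symm
            refine ⟨a, b', h1.symm, by simp at hb; omega, fun x hx => hall x (by simp [hx])⟩
    | false =>
      simp only [Bool.false_eq_true, if_false]
      constructor
      · intro h
        have : k = 0 := by omega
        subst this
        exact ⟨l ++ [p], [], by simp, by simp, by simp⟩
      · rintro ⟨a, b, h, hb, hall⟩
        rcases List.eq_nil_or_concat b with rfl | ⟨b', p0, rfl⟩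
        · have := congrArg List.length h
          simp at this hb
          simp
          omega
        · simp only [List.concat_eq_append, ← List.append_assoc] at h hall
          obtain ⟨h1, rfl⟩ := List.append_singleton_inj.mp h.symm
          have := hall p0 (by simp)
          simp [hp] at this

lemma pvWin_append (P : Int → Bool) (k : Nat) (l : List Int) (p : Int) :
    pvWin P k (l ++ [p]) ↔ pvWin P k l ∨ pvSuff P k (l ++ [p]) := by
  constructor
  · rintro ⟨a, b, c, h, hb, hall⟩
    rcases List.eq_nil_or_concat c with rfl | ⟨c', p0, rfl⟩
    · right; exact ⟨a, b, by simpa using h, hb, hall⟩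
    · left
      simp only [List.concat_eq_append, ← List.append_assoc] at h
      obtain ⟨h1, rfl⟩ := List.append_singleton_inj.mp h.symm
      exact ⟨a, b, c', by simp [h1], hb, hall⟩
  · rintro (⟨a, b, c, rfl, hb, hall⟩ | ⟨a, b, h, hb, hall⟩)
    · exact ⟨a, b, c ++ [p], by simp, hb, hall⟩
    · exact ⟨a, b, [], by simpa using h, hb, hall⟩

lemma pvWin_nil (P : Int → Bool) (k : Nat) (hk : 0 < k) : ¬ pvWin P k [] := by
  rintro ⟨a, b, c, h, hb, -⟩
  have := congrArg List.length h
  simp at this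
  omega

lemma pvWin_length (P : Int → Bool) (k : Nat) (l : List Int) (h : pvWin P k l) :
    k ≤ l.length := by
  obtain ⟨a, b, c, rfl, hb, -⟩ := h
  simp [hb]
  omega

lemma pvLast_one_iff (l : List Int) :
    (l.getLast? == some 1) = true ↔ 1 ≤ pvSuffRun pvP1 l := by
  rw [pvSuffRun_ge_iff]
  constructor
  · intro h
    rw [beq_iff_eq, List.getLast?_eq_some_iff] at h
    obtain ⟨a, rfl⟩ := h
    exact ⟨a, [1], rfl, rfl, by simp [pvP1]⟩
  · rintro ⟨a, b, rfl, hb, hall⟩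
    rcases b with - | ⟨x, b⟩
    · simp at hb
    · rcases b with - | ⟨y, b⟩
      · have := hall x (by simp)
        simp [pvP1] at this
        subst this
        simp
      · simp at hb

lemma pvFold_inv (l : List Int) :
    (l.foldl pvStepB (false, 0, 0, false, false, false)).1 = (l.getLast? == some 1) ∧
    (l.foldl pvStepB (false, 0, 0, false, false, false)).2.1 = (pvSuffRun pvP2 l : Int) ∧
    (l.foldl pvStepB (false, 0, 0, false, false, false)).2.2.1 = (pvSuffRun pvP4 l : Int) ∧
    ((l.foldl pvStepB (false, 0, 0, false, false, false)).2.2.2.1 = true ↔ pvWin pvP1 2 l) ∧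
    ((l.foldl pvStepB (false, 0, 0, false, false, false)).2.2.2.2.1 = true ↔ pvWin pvP2 3 l) ∧
    ((l.foldl pvStepB (false, 0, 0, false, false, false)).2.2.2.2.2 = true ↔ pvWin pvP4 5 l) := by
  induction l using List.reverseRecOn with
  | nil =>
    refine ⟨by simp, by simp [pvSuffRun], by simp [pvSuffRun], ?_, ?_, ?_⟩
    · simp [pvWin_nil pvP1 2 (by omega)]
    · simp [pvWin_nil pvP2 3 (by omega)]
    · simp [pvWin_nil pvP4 5 (by omega)]
  | append_singleton l p ih =>
    obtain ⟨h1, h2, h3, h4, h5, h6⟩ := ih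
    rw [List.foldl_append] at *
    rcases hs : l.foldl pvStepB (false, 0, 0, false, false, false) with ⟨po, t2, n4, bb, tf, nf⟩
    rw [hs] at h1 h2 h3 h4 h5 h6
    simp only [List.foldl_cons, List.foldl_nil, pvStepB] at *
    refine ⟨by simp, ?_, ?_, ?_, ?_, ?_⟩
    · rw [pvSuffRun_append]
      by_cases hp : p ≤ 2 <;> simp [pvP2, hp, h2]
    · rw [pvSuffRun_append]
      by_cases hp : p = 4 <;> simp [pvP4, hp, h3]
    · rw [pvWin_append]
      constructor
      · intro h
        rcases Bool.or_eq_true_iff.mp h with h | h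
        · exact Or.inl (h4.mp h)
        · right
          rw [← pvSuffRun_ge_iff, pvSuffRun_append]
          rcases Bool.and_eq_true_iff.mp h with ⟨hp1, hpo⟩
          have := (pvLast_one_iff l).mp (h1 ▸ hpo)
          simp [pvP1, hp1]
          omega
      · rintro (h | h)
        · simp [h4.mpr h]
        · rw [← pvSuffRun_ge_iff, pvSuffRun_append] at h
          by_cases hp1 : pvP1 p = true
          · simp only [hp1, if_pos] at h
            have hl : 1 ≤ pvSuffRun pvP1 l := by omega
            have := (pvLast_one_iff l).mpr hl
            rw [← h1] at this
            simp [pvP1] at hp1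
            simp [hp1, this]
          · simp [hp1] at h
    · rw [pvWin_append]
      have hrun : (if p ≤ 2 then t2 + 1 else 0) = ((if pvP2 p then pvSuffRun pvP2 l + 1 else 0 : Nat) : Int) := by
        by_cases hp : p ≤ 2 <;> simp [pvP2, hp, h2]
      rw [hrun, ← pvSuffRun_append]
      constructor
      · intro h
        rcases Bool.or_eq_true_iff.mp h with h | h
        · exact Or.inl (h5.mp h)
        · right
          rw [← pvSuffRun_ge_iff]
          simp at h
          omega
      · rintro (h | h)
        · simp [h5.mpr h]
        · rw [← pvSuffRun_ge_iff] at h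
          simp
          exact Or.inr h
    · rw [pvWin_append]
      have hrun : (if p ≠ 4 then n4 + 1 else 0) = ((if pvP4 p then pvSuffRun pvP4 l + 1 else 0 : Nat) : Int) := by
        by_cases hp : p = 4 <;> simp [pvP4, hp, h3]
      rw [hrun, ← pvSuffRun_append]
      constructor
      · intro h
        rcases Bool.or_eq_true_iff.mp h with h | h
        · exact Or.inl (h6.mp h)
        · right
          rw [← pvSuffRun_ge_iff]
          simp at h
          omega
      · rintro (h | h)
        · simp [h6.mpr h]
        · rw [← pvSuffRun_ge_iff] at h
          simp
          exact Or.inr h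

lemma pvIdx_win (P : Int → Bool) (k : Nat) (l : List Int) :
    (∃ m : Nat, m + k ≤ l.length ∧ ∀ j, j < k → P (l.getD (m + j) 0) = true) ↔ pvWin P k l := by
  constructor
  · rintro ⟨m, hm, hall⟩
    refine ⟨l.take m, (l.drop m).take k, l.drop (m + k), ?_, ?_, ?_⟩
    · conv_lhs => rw [← List.take_append_drop m l, ← List.take_append_drop k (List.drop m l)]
      simp [List.drop_drop, Nat.add_comm]
    · simp
      omega
    · intro x hx
      obtain ⟨j, hj, rfl⟩ := List.mem_iff_getElem.mp hx
      have hjk : j < k := by simp at hj; omega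
      have hget : ((l.drop m).take k)[j] = l[m + j]'(by omega) := by
        simp [List.getElem_take, List.getElem_drop]
      rw [hget]
      have := hall j hjk
      rwa [List.getD_eq_getElem l 0 (by omega)] at this
  · rintro ⟨a, b, c, rfl, hb, hall⟩
    refine ⟨a.length, by simp; omega, ?_⟩
    intro j hj
    have hlen : a.length + j < (a ++ b ++ c).length := by simp; omega
    rw [List.getD_eq_getElem _ 0 hlen]
    have hget : (a ++ b ++ c)[a.length + j]'hlen = b[j]'(by omega) := by
      have h1 : (a ++ b ++ c)[a.length + j]'hlen = (a ++ (b ++ c))[a.length + j]'(by simpa using hlen) := by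
        simp [List.append_assoc]
      rw [h1, List.getElem_append_right (by omega)]
      simp only [Nat.add_sub_cancel_left]
      rw [List.getElem_append_left (by omega)]
    rw [hget]
    exact hall _ (by simp)

lemma pvCast1 (m : Nat) : ((m : Int) + 1) = ((m + 1 : Nat) : Int) := by push_cast; ring
lemma pvCast2 (m : Nat) : ((m : Int) + 2) = ((m + 2 : Nat) : Int) := by push_cast; ring
lemma pvCast3 (m : Nat) : ((m : Int) + 3) = ((m + 3 : Nat) : Int) := by push_cast; ring
lemma pvCast4 (m : Nat) : ((m : Int) + 4) = ((m + 4 : Nat) : Int) := by push_cast; ring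

lemma pvA_btb (l : List Int) :
    ((PySem.List.pyRange 0 ((l.length : Int) - 1) 1).any (fun i =>
      (PySem.List.pyGetD l i 0 == 1) && (PySem.List.pyGetD l (i + 1) 0 == 1))) = true ↔
    pvWin pvP1 2 l := by
  rw [← pvIdx_win, List.any_eq_true]
  constructor
  · rintro ⟨i, hi, hf⟩
    rw [PySem.List.mem_pyRange_one] at hi
    obtain ⟨h0, h1⟩ := hi
    lift i to Nat using h0 with m
    refine ⟨m, by omega, ?_⟩
    intro j hj
    rcases Bool.and_eq_true_iff.mp hf with ⟨ha, hb⟩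
    rw [PySem.List.pyGetD_natCast] at ha
    rw [pvCast1, PySem.List.pyGetD_natCast] at hb
    interval_cases j
    · simpa [pvP1] using ha
    · simpa [pvP1] using hb
  · rintro ⟨m, hm, hall⟩
    refine ⟨(m : Int), by rw [PySem.List.mem_pyRange_one]; omega, ?_⟩
    have h0 := hall 0 (by omega)
    have h1 := hall 1 (by omega)
    simp only [pvP1, Nat.add_zero] at h0 h1
    rw [pvCast1, PySem.List.pyGetD_natCast, PySem.List.pyGetD_natCast]
    simp only [Bool.and_eq_true]
    constructor
    · simpa using h0
    · simpa using h1

lemma pvA_top2 (l : List Int) :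
    ((PySem.List.pyRange 0 ((l.length : Int) - 2) 1).any (fun i =>
      (PySem.List.pyRange 0 3 1).all (fun k => decide (PySem.List.pyGetD l (i + k) 0 ≤ 2)))) = true ↔
    pvWin pvP2 3 l := by
  rw [← pvIdx_win, List.any_eq_true]
  have hr : PySem.List.pyRange 0 3 1 = [0, 1, 2] := by decide
  constructor
  · rintro ⟨i, hi, hf⟩
    rw [PySem.List.mem_pyRange_one] at hi
    obtain ⟨h0, h1⟩ := hi
    lift i to Nat using h0 with m
    rw [hr] at hf
    simp only [List.all_cons, List.all_nil, Bool.and_true, Bool.and_eq_true, decide_eq_true_eq] at hf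
    obtain ⟨ha, hb, hc⟩ := hf
    rw [add_zero, PySem.List.pyGetD_natCast] at ha
    rw [pvCast1, PySem.List.pyGetD_natCast] at hb
    rw [pvCast2, PySem.List.pyGetD_natCast] at hc
    refine ⟨m, by omega, ?_⟩
    intro j hj
    interval_cases j
    · simpa [pvP2] using ha
    · simpa [pvP2] using hb
    · simpa [pvP2] using hc
  · rintro ⟨m, hm, hall⟩
    refine ⟨(m : Int), by rw [PySem.List.mem_pyRange_one]; omega, ?_⟩
    have h0 := hall 0 (by omega)
    have h1 := hall 1 (by omega)
    have h2 := hall 2 (by omega)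
    simp only [pvP2, Nat.add_zero, decide_eq_true_eq] at h0 h1 h2
    rw [hr]
    simp only [List.all_cons, List.all_nil, Bool.and_true, Bool.and_eq_true, decide_eq_true_eq]
    rw [add_zero, pvCast1, pvCast2, PySem.List.pyGetD_natCast, PySem.List.pyGetD_natCast,
        PySem.List.pyGetD_natCast]
    refine ⟨by simpa using h0, by simpa using h1, by simpa using h2⟩

lemma pvA_no4 (l : List Int) :
    ((PySem.List.pyRange 0 ((l.length : Int) - 4) 1).any (fun i =>
      (PySem.List.pyRange 0 5 1).all (fun k => PySem.List.pyGetD l (i + k) 0 != 4))) = true ↔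
    pvWin pvP4 5 l := by
  rw [← pvIdx_win, List.any_eq_true]
  have hr : PySem.List.pyRange 0 5 1 = [0, 1, 2, 3, 4] := by decide
  constructor
  · rintro ⟨i, hi, hf⟩
    rw [PySem.List.mem_pyRange_one] at hi
    obtain ⟨h0, h1⟩ := hi
    lift i to Nat using h0 with m
    rw [hr] at hf
    simp only [List.all_cons, List.all_nil, Bool.and_true, Bool.and_eq_true] at hf
    obtain ⟨ha, hb, hc, hd, he⟩ := hf
    rw [add_zero, PySem.List.pyGetD_natCast] at ha
    rw [pvCast1, PySem.List.pyGetD_natCast] at hb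
    rw [pvCast2, PySem.List.pyGetD_natCast] at hc
    rw [pvCast3, PySem.List.pyGetD_natCast] at hd
    rw [pvCast4, PySem.List.pyGetD_natCast] at he
    refine ⟨m, by omega, ?_⟩
    intro j hj
    interval_cases j
    · simpa [pvP4] using ha
    · simpa [pvP4] using hb
    · simpa [pvP4] using hc
    · simpa [pvP4] using hd
    · simpa [pvP4] using he
  · rintro ⟨m, hm, hall⟩
    refine ⟨(m : Int), by rw [PySem.List.mem_pyRange_one]; omega, ?_⟩
    have h0 := hall 0 (by omega)
    have h1 := hall 1 (by omega)
    have h2 := hall 2 (by omega)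
    have h3 := hall 3 (by omega)
    have h4 := hall 4 (by omega)
    simp only [pvP4, Nat.add_zero] at h0 h1 h2 h3 h4
    rw [hr]
    simp only [List.all_cons, List.all_nil, Bool.and_true, Bool.and_eq_true]
    rw [add_zero, pvCast1, pvCast2, pvCast3, pvCast4, PySem.List.pyGetD_natCast,
        PySem.List.pyGetD_natCast, PySem.List.pyGetD_natCast, PySem.List.pyGetD_natCast,
        PySem.List.pyGetD_natCast]
    exact ⟨by simpa using h0, by simpa using h1, by simpa using h2, by simpa using h3,
      by simpa using h4⟩

-- ===== VERDICT (by name: the statement is the Claim_ definition above) =====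
theorem consistency_bonus_spec : Claim_equal_consistency_bonus := by
  intro l _
  unfold Spec_consistency_bonus consistency_bonus consistency_bonus_alt
  obtain ⟨-, -, -, h4, h5, h6⟩ := pvFold_inv l
  rcases hs : l.foldl pvStepB (false, 0, 0, false, false, false) with ⟨po, t2, n4, bb, tf, nf⟩
  rw [hs] at h4 h5 h6
  simp only [PySem.List.len_eq]
  have e1 := Bool.eq_iff_iff.mpr ((pvA_btb l).trans h4.symm)
  have e2 := Bool.eq_iff_iff.mpr ((pvA_top2 l).trans h5.symm)
  have e3 := Bool.eq_iff_iff.mpr ((pvA_no4 l).trans h6.symm)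
  simp only [e1, e2, e3]
  by_cases hL : ((l.length : Int) ≥ 5)
  · simp only [hL, if_pos]
    split_ifs <;> omega
  · have hnf : nf = false := by
      cases hnf : nf
      · rfl
      · exact absurd (by exact_mod_cast Nat.cast_le.mpr (pvWin_length _ _ _ (h6.mp hnf)) :
          (5 : Int) ≤ (l.length : Int)) hL
    simp only [hL, hnf]
    split_ifs <;> omega
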